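-- pv_equiv track=rewrite | github.com/eliottcassidy2000/math | 04-computation/vitali_overlap_hidden_structure.py | overlap_weight_histogram
-- ===== SOURCE A (Python) =====
-- from collections import defaultdict
--
-- def overlap_weight_histogram(cycles):
--     """Return histogram of overlap weights."""
--     n = len(cycles)
--     hist = defaultdict(int)
--     for i in range(n):
--         for j in range(i+1, n):
--             ov = len(cycles[i][0] & cycles[j][0])
--             hist[ov] += 1
--     return dict(sorted(hist.items()))
-- ===== SOURCE B (Python) =====
-- def overlap_weight_histogram(cycles):
--     """Return histogram of overlap weights (inverted index over elements)."""
--     n = len(cycles)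
--     if n < 2:
--         return {}
--     index = {}
--     for i, cyc in enumerate(cycles):
--         for e in cyc[0]:
--             index.setdefault(e, []).append(i)
--     pair_ov = {}
--     for ids in index.values():
--         for a, i in enumerate(ids):
--             for j in ids[a + 1:]:
--                 pair_ov[(i, j)] = pair_ov.get((i, j), 0) + 1
--     hist = {}
--     for ov in pair_ov.values():
--         hist[ov] = hist.get(ov, 0) + 1
--     zero = n * (n - 1) // 2 - len(pair_ov)
--     if zero:
--         hist[0] = zero
--     return dict(sorted(hist.items()))
-- ===== Notes on version B (the rewrite author's own statement) =====
-- stated objective: faster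
-- what changed: Replaces A's O(n^2) loop over all pairs with a set intersection per pair by an inverted index (element -> indices of cycles containing it) from which each element increments the overlap counter of every pair of cycles containing it; the zero-overlap bucket is recovered by subtraction from n*(n-1)/2.
import Mathlib
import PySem

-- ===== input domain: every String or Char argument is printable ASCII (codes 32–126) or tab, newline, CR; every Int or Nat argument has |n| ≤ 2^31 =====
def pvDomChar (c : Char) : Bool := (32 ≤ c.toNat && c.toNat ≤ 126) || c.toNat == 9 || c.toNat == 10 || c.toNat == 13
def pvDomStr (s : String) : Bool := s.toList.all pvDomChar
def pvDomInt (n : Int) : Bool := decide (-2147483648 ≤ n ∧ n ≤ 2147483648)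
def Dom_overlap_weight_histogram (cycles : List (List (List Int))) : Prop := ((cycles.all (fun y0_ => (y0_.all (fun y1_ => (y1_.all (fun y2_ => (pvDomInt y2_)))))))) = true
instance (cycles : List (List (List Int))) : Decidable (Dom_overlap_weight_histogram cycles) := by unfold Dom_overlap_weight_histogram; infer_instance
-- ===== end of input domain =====

-- B replaces A's O(n^2) pairwise set-intersection loop by an inverted index (element -> indices of
-- the cycles containing it): each element contributes to the overlap count of every pair of cycles
-- containing it, and the zero-overlap bucket is recovered by subtraction from n*(n-1)/2.
-- The inner collections of `cycles` are Python sets; they are modelled as their lists of distinct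
-- elements (PySem.Set) and the ports only use them in order-insensitive ways.

-- ===== PORT A =====
def overlap_weight_histogram (cycles : List (List (List Int))) : List (Int × Int) :=
  let n : Int := cycles.length
  let hist : PySem.Dict Int Int :=
    (PySem.List.pyRange 0 n 1).foldl (fun hist i =>
      (PySem.List.pyRange (i + 1) n 1).foldl (fun hist j =>
        -- ov = len(cycles[i][0] & cycles[j][0]) on sets
        let si : PySem.Set Int := PySem.Set.ofList (PySem.List.pyGetD (PySem.List.pyGetD cycles i []) 0 [])
        let sj : PySem.Set Int := PySem.Set.ofList (PySem.List.pyGetD (PySem.List.pyGetD cycles j []) 0 [])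
        let ov : Int := ((PySem.Set.inter si sj).length : Int)
        -- hist[ov] += 1 on a defaultdict(int)
        hist.insert ov (hist.getD ov 0 + 1)) hist) PySem.Dict.empty
  -- dict(sorted(hist.items())): keys are distinct, so sorting the pairs lexicographically
  -- is sorting them by key (stable sort)
  PySem.List.sorted hist.items (fun kv => kv.1) false

-- ===== PORT B =====
def overlap_weight_histogram_alt (cycles : List (List (List Int))) : List (Int × Int) :=
  let n : Int := cycles.length
  if n < 2 then []
  else
    -- index.setdefault(e, []).append(i)  ==  index[e] = index.get(e, []) + [i]  (Dict.modify)
    let index : PySem.Dict Int (List Int) :=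
      (PySem.List.enumerate cycles).foldl (fun d ic =>
        (PySem.Set.ofList (PySem.List.pyGetD ic.2 0 [])).foldl
          (fun d e => d.modify e [] (· ++ [ic.1])) d) PySem.Dict.empty
    -- pair_ov[(i, j)] = pair_ov.get((i, j), 0) + 1 over 'for a, i in enumerate(ids): for j in ids[a+1:]'
    let pair_ov : PySem.Dict (Int × Int) Int :=
      index.values.foldl (fun p ids =>
        (PySem.List.enumerate ids).foldl (fun p ai =>
          (PySem.List.slice ids (some (ai.1 + 1)) none).foldl (fun p j =>
            p.insert (ai.2, j) (p.getD (ai.2, j) 0 + 1)) p) p) PySem.Dict.empty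
    -- hist[ov] = hist.get(ov, 0) + 1
    let hist : PySem.Dict Int Int :=
      pair_ov.values.foldl (fun h ov => h.insert ov (h.getD ov 0 + 1)) PySem.Dict.empty
    let zero : Int := PySem.Int.floordiv (n * (n - 1)) 2 - (pair_ov.size : Int)
    let hist2 : PySem.Dict Int Int := if zero ≠ 0 then hist.insert 0 zero else hist
    -- dict(sorted(hist.items())): distinct keys, lexicographic = by key
    PySem.List.sorted hist2.items (fun kv => kv.1) false

-- ===== PRECONDITION & SPEC =====
-- Pre_ excludes exactly the inputs where the Python raises IndexError: with two or more cycles,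
-- 'cycles[i][0]' is evaluated for every index, so every cycle must be a nonempty tuple.
def Pre_overlap_weight_histogram (cycles : List (List (List Int))) : Prop :=
  cycles.length ≤ 1 ∨ cycles.all (fun c => !c.isEmpty) = true
instance (cycles : List (List (List Int))) : Decidable (Pre_overlap_weight_histogram cycles) := by unfold Pre_overlap_weight_histogram; infer_instance
def pvWitness_overlap_weight_histogram : List (List (List Int)) := [[[1, 2]], [[2, 3]], [[4]]]

def Spec_overlap_weight_histogram (cycles : List (List (List Int))) (out : List (Int × Int)) : Prop := out = overlap_weight_histogram_alt cycles
instance (cycles : List (List (List Int))) (out : List (Int × Int)) : Decidable (Spec_overlap_weight_histogram cycles out) := by unfold Spec_overlap_weight_histogram; infer_instance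

-- ===== CLAIM (what is proved, stated in full; the proofs are below) =====
def Claim_equal_overlap_weight_histogram : Prop := ∀ (cycles : List (List (List Int))), Dom_overlap_weight_histogram cycles → Pre_overlap_weight_histogram cycles → Spec_overlap_weight_histogram cycles (overlap_weight_histogram cycles)

-- ===== LEMMAS AND PROOFS =====

-- ===== helper definitions (proof only) =====
def owhS (cycles : List (List (List Int))) (i : Int) : PySem.Set Int :=
  PySem.Set.ofList (PySem.List.pyGetD (PySem.List.pyGetD cycles i []) 0 [])

def owhOv (cycles : List (List (List Int))) (p : Int × Int) : Int :=
  ((PySem.Set.inter (owhS cycles p.1) (owhS cycles p.2)).length : Int)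

def owhPairs (n : Int) : List (Int × Int) :=
  (PySem.List.pyRange 0 n 1).flatMap (fun i => (PySem.List.pyRange (i + 1) n 1).map (fun j => (i, j)))

def owhOV (cycles : List (List (List Int))) : List Int :=
  (owhPairs cycles.length).map (owhOv cycles)

def owhCanon (xs : List Int) : List (Int × Int) :=
  (PySem.List.sorted (PySem.Set.ofList xs) (fun k => k) false).map (fun k => (k, (xs.count k : Int)))

def owhTailPairs : List Int → List (Int × Int)
  | [] => []
  | x :: t => t.map (fun j => (x, j)) ++ owhTailPairs t

-- combos as the port writes them
def owhCombos (ids : List Int) : List (Int × Int) :=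
  (PySem.List.enumerate ids).flatMap (fun ai => (PySem.List.slice ids (some (ai.1 + 1)) none).map (fun j => (ai.2, j)))

def owhL (cycles : List (List (List Int))) : List (Int × Int) :=
  (PySem.List.enumerate cycles).flatMap (fun ic => (PySem.Set.ofList (PySem.List.pyGetD ic.2 0 [])).map (fun e => (e, ic.1)))

def owhIndex (cycles : List (List (List Int))) : PySem.Dict Int (List Int) :=
  (PySem.List.enumerate cycles).foldl (fun d ic =>
    (PySem.Set.ofList (PySem.List.pyGetD ic.2 0 [])).foldl
      (fun d e => d.modify e [] (· ++ [ic.1])) d) PySem.Dict.empty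

def owhIds (cycles : List (List (List Int))) (e : Int) : List Int :=
  (PySem.List.pyRange 0 cycles.length 1).filter (fun i => decide (e ∈ owhS cycles i))

def owhK (cycles : List (List (List Int))) : List (Int × Int) :=
  (owhIndex cycles).values.flatMap owhCombos

-- ===== step lemmas =====

theorem owh_sorted_counter (xs : List Int) :
    PySem.List.sorted (PySem.Dict.counter xs).items (fun kv => kv.1) false = owhCanon xs := by
  apply PySem.List.sorted_eq_of_perm_of_pairwise_lt
  · rw [PySem.Dict.items_counter]
    exact (PySem.List.sorted_perm _ _ _).map _
  · have h := PySem.List.sorted_ofList_pairwise_lt (κ := Int) xs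
    rw [owhCanon, List.pairwise_map]
    exact h

theorem owh_A_eq_canon (cycles : List (List (List Int))) :
    overlap_weight_histogram cycles = owhCanon (owhOV cycles) := by
  rw [← owh_sorted_counter]
  refine congrArg (fun d : PySem.Dict Int Int => PySem.List.sorted d.items (fun kv => kv.1) false) ?_
  rw [← PySem.Dict.foldl_insert_getD_add_one_eq_counter, owhOV, List.foldl_map, owhPairs,
      List.flatMap_def, List.foldl_flatten, List.foldl_map]
  simp only [List.foldl_map]
  rfl

theorem owh_enum_shift {α : Type} (xs : List α) (s : Int) :
    PySem.List.enumerate xs (s + 1) = (PySem.List.enumerate xs s).map (fun p => (p.1 + 1, p.2)) := by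
  induction xs generalizing s with
  | nil => simp [PySem.List.enumerate_nil]
  | cons x t ih =>
    simp only [PySem.List.enumerate_cons, List.map_cons]
    rw [show s + 1 + 1 = (s + 1) + 1 by ring, ih (s + 1)]

theorem owh_combos_eq_tailPairs (ids : List Int) : owhCombos ids = owhTailPairs ids := by
  induction ids with
  | nil => simp [owhCombos, owhTailPairs, PySem.List.enumerate_nil]
  | cons x t ih =>
    rw [owhCombos, owhTailPairs, PySem.List.enumerate_cons, List.flatMap_cons]
    congr 1
    · rw [show (0 : Int) + 1 = 1 from rfl, PySem.List.slice_from_one]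
      rfl
    · rw [show (0 : Int) + 1 = 0 + 1 from rfl, owh_enum_shift, List.flatMap_map, ← ih, owhCombos]
      apply List.flatMap_congr
      intro ai hai
      rw [PySem.List.mem_enumerate_iff] at hai
      obtain ⟨k, hk, rfl⟩ := hai
      have h1 : ((0 : Int) + (k : Int)) + 1 + 1 = (((k + 2 : Nat)) : Int) := by push_cast; ring
      have h2 : ((0 : Int) + (k : Int)) + 1 = (((k + 1 : Nat)) : Int) := by push_cast; ring
      rw [h1, h2, PySem.List.slice_from_natCast, PySem.List.slice_from_natCast]
      rfl

theorem owh_index_eq_foldL (cycles : List (List (List Int))) :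
    owhIndex cycles = (owhL cycles).foldl (fun d p => d.modify p.1 [] (fun v => v ++ [p.2])) PySem.Dict.empty := by
  rw [owhL, List.flatMap_def, List.foldl_flatten, List.foldl_map]
  simp only [List.foldl_map]
  rfl

theorem owh_flatMap_if {α : Type} (l : List α) (p : α → Bool) :
    l.flatMap (fun x => if p x then [x] else []) = l.filter p := by
  induction l with
  | nil => rfl
  | cons x t ih =>
    rw [List.flatMap_cons, List.filter_cons, ih]
    by_cases h : p x <;> simp [h]

theorem owh_index_getD (cycles : List (List (List Int))) (e : Int) :
    (owhIndex cycles).getD e [] = owhIds cycles e := by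
  rw [owh_index_eq_foldL, PySem.Dict.getD_foldl_modify_append, PySem.Dict.getD_empty, List.nil_append]
  rw [owhL, List.filter_flatMap, List.map_flatMap]
  have hblk : ∀ ic : Int × List (List Int),
      ((PySem.Set.ofList (PySem.List.pyGetD ic.2 0 [])).map (fun e' => (e', ic.1))
        |>.filter (fun p => p.1 == e) |>.map (fun p => p.2)) =
      (if e ∈ PySem.Set.ofList (PySem.List.pyGetD ic.2 0 []) then [ic.1] else []) := by
    intro ic
    rw [List.filter_map]
    have : ((PySem.Set.ofList (PySem.List.pyGetD ic.2 0 [])).filter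
        ((fun p : Int × Int => p.1 == e) ∘ (fun e' => (e', ic.1)))) =
        (PySem.Set.ofList (PySem.List.pyGetD ic.2 0 [])).filter (fun x => x == e) := rfl
    rw [this, List.filter_beq]
    by_cases hm : e ∈ PySem.Set.ofList (PySem.List.pyGetD ic.2 0 [])
    · rw [List.count_eq_one_of_mem (PySem.Set.nodup_ofList _) hm, if_pos hm]
      rfl
    · rw [List.count_eq_zero_of_not_mem hm, if_neg hm]
      rfl
  calc (PySem.List.enumerate cycles).flatMap
        (fun ic => ((PySem.Set.ofList (PySem.List.pyGetD ic.2 0 [])).map (fun e' => (e', ic.1))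
          |>.filter (fun p => p.1 == e) |>.map (fun p => p.2)))
      = (PySem.List.enumerate cycles).flatMap
        (fun ic => if e ∈ PySem.Set.ofList (PySem.List.pyGetD ic.2 0 []) then [ic.1] else []) := by
        exact List.flatMap_congr (fun ic _ => hblk ic)
    _ = owhIds cycles e := by
        rw [PySem.List.enumerate_eq_map_pyRange cycles [], List.flatMap_map]
        rw [owhIds, ← owh_flatMap_if]
        refine List.flatMap_congr (fun j _ => ?_)
        simp only [owhS]
        split <;> simp_all
  

theorem owh_index_keys (cycles : List (List (List Int))) :
    (owhIndex cycles).keys = PySem.Set.ofList ((owhL cycles).map (fun p => p.1)) := by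
  rw [owh_index_eq_foldL]
  have h := PySem.Dict.keys_foldl_modify_key (owhL cycles) (fun p : Int × Int => p.1) []
    (fun _ p v => v ++ [p.2]) PySem.Dict.empty
  rw [PySem.Dict.keys_empty] at h
  exact h

theorem owh_index_keys_nodup (cycles : List (List (List Int))) : (owhIndex cycles).keys.Nodup := by
  rw [owh_index_keys]
  exact PySem.Set.nodup_ofList _

theorem owh_mem_index_keys (cycles : List (List (List Int))) (e : Int) :
    e ∈ (owhIndex cycles).keys ↔ ∃ i ∈ PySem.List.pyRange 0 cycles.length 1, e ∈ owhS cycles i := by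
  rw [owh_index_keys, PySem.Set.mem_ofList, owhL,
      PySem.List.enumerate_eq_map_pyRange cycles [], List.flatMap_map, List.map_flatMap]
  simp only [List.map_map]
  simp [List.mem_flatMap, Function.comp_def, owhS]

theorem owh_count_tailPairs (ids : List Int) (h : ids.Pairwise (· < ·)) (p : Int × Int) :
    (owhTailPairs ids).count p = if p.1 ∈ ids ∧ p.2 ∈ ids ∧ p.1 < p.2 then 1 else 0 := by
  obtain ⟨i, j⟩ := p
  dsimp only
  induction ids with
  | nil => simp [owhTailPairs]
  | cons x t ih =>
    rw [List.pairwise_cons] at h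
    obtain ⟨hx, ht⟩ := h
    have hxt : x ∉ t := fun hmem => lt_irrefl x (hx x hmem)
    have hnd : t.Nodup := ht.imp ne_of_lt
    rw [owhTailPairs, List.count_append, ih ht]
    by_cases hi : i = x
    · subst hi
      have h1 : (t.map (fun j' => (i, j'))).count (i, j) = t.count j :=
        List.count_map_of_injective t _ (fun a b hab => by simpa using hab) j
      rw [h1]
      by_cases hj : j ∈ t
      · have hij := hx j hj
        rw [List.count_eq_one_of_mem hnd hj]
        have hxmem : ¬ (i ∈ t ∧ j ∈ t ∧ i < j) := fun hc => hxt hc.1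
        rw [if_neg hxmem, if_pos ⟨List.mem_cons_self, List.mem_cons_of_mem i hj, hij⟩]
      · rw [List.count_eq_zero_of_not_mem hj]
        have hL : ¬ (i ∈ t ∧ j ∈ t ∧ i < j) := fun hc => hxt hc.1
        have hR : ¬ (i ∈ i :: t ∧ j ∈ i :: t ∧ i < j) := by
          rintro ⟨-, hj2, hij⟩
          rcases List.mem_cons.mp hj2 with heq | hj3
          · rw [heq] at hij
            exact lt_irrefl i hij
          · exact hj hj3
        rw [if_neg hL, if_neg hR]
    · have h1 : (t.map (fun j' => (x, j'))).count (i, j) = 0 := by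
        rw [List.count_eq_zero_of_not_mem]
        intro hmem
        rcases List.mem_map.mp hmem with ⟨j', _, hj'⟩
        exact hi (by simpa using congrArg Prod.fst hj'.symm)
      rw [h1]
      by_cases hc : i ∈ t ∧ j ∈ t ∧ i < j
      · rw [if_pos hc, if_pos ⟨List.mem_cons_of_mem x hc.1, List.mem_cons_of_mem x hc.2.1, hc.2.2⟩]
      · rw [if_neg hc, if_neg ?_]
        rintro ⟨hi2, hj2, hij⟩
        rcases List.mem_cons.mp hi2 with heq | hi3
        · exact hi heq
        · rcases List.mem_cons.mp hj2 with heq | hj3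
          · rw [heq] at hij
            exact absurd (hx i hi3) (not_lt.mpr (le_of_lt hij))
          · exact hc ⟨hi3, hj3, hij⟩

theorem owh_mem_pairs (n : Int) (p : Int × Int) :
    p ∈ owhPairs n ↔ 0 ≤ p.1 ∧ p.1 < p.2 ∧ p.2 < n := by
  obtain ⟨i, j⟩ := p
  simp [owhPairs, List.mem_flatMap, PySem.List.mem_pyRange_one]
  omega

theorem owh_pairs_nodup (n : Int) : (owhPairs n).Nodup := by
  rw [owhPairs, List.nodup_flatMap]
  constructor
  · intro i _
    exact (PySem.List.nodup_pyRange_one _ _).map (fun a b h => by simpa using h)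
  · refine (PySem.List.nodup_pyRange_one _ _).pairwise_of_forall_ne ?_
    intro i j _ _ hne
    simp only [List.disjoint_left, List.mem_map]
    rintro p ⟨a, _, rfl⟩ ⟨b, _, h⟩
    exact hne (by simpa using congrArg Prod.fst h.symm)

theorem owh_values (cycles : List (List (List Int))) :
    (owhIndex cycles).values = (owhIndex cycles).keys.map (owhIds cycles) := by
  rw [PySem.Dict.values_eq_map_keys _ (owh_index_keys_nodup cycles) []]
  exact List.map_congr_left (fun e _ => owh_index_getD cycles e)

theorem owh_K_eq (cycles : List (List (List Int))) :
    owhK cycles = (owhIndex cycles).keys.flatMap (fun e => owhTailPairs (owhIds cycles e)) := by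
  rw [owhK, owh_values, List.flatMap_map]
  exact List.flatMap_congr (fun e _ => owh_combos_eq_tailPairs _)

theorem owh_ids_pairwise (cycles : List (List (List Int))) (e : Int) :
    (owhIds cycles e).Pairwise (· < ·) :=
  (PySem.List.pairwise_lt_pyRange_one 0 _).filter _

theorem owh_sum_ite {α : Type} (l : List α) (q : α → Bool) :
    (l.map (fun e => if q e then (1 : Nat) else 0)).sum = (l.filter q).length := by
  induction l with
  | nil => rfl
  | cons x t ih =>
    rw [List.map_cons, List.sum_cons, List.filter_cons, ih]
    by_cases h : q x
    · simp [h]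
      omega
    · simp [h]

theorem owh_count_K (cycles : List (List (List Int))) (p : Int × Int) (hp : p ∈ owhPairs cycles.length) :
    (owhK cycles).count p =
      ((owhIndex cycles).keys.filter (fun e => decide (e ∈ owhS cycles p.1) && decide (e ∈ owhS cycles p.2))).length := by
  rw [owh_mem_pairs] at hp
  obtain ⟨h0, hlt, hn⟩ := hp
  rw [owh_K_eq, List.count_flatMap]
  have hcong : ∀ e ∈ (owhIndex cycles).keys,
      (List.count p ∘ fun e => owhTailPairs (owhIds cycles e)) e =
      (if (decide (e ∈ owhS cycles p.1) && decide (e ∈ owhS cycles p.2)) then (1 : Nat) else 0) := by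
    intro e _
    simp only [Function.comp_apply]
    rw [owh_count_tailPairs _ (owh_ids_pairwise cycles e) p]
    refine if_congr ?_ rfl rfl
    simp only [owhIds, List.mem_filter, PySem.List.mem_pyRange_one, decide_eq_true_eq,
      Bool.and_eq_true]
    constructor
    · rintro ⟨⟨_, he1⟩, ⟨_, he2⟩, _⟩
      exact ⟨he1, he2⟩
    · rintro ⟨he1, he2⟩
      exact ⟨⟨⟨h0, by omega⟩, he1⟩, ⟨⟨by omega, hn⟩, he2⟩, hlt⟩
  rw [List.map_congr_left hcong, owh_sum_ite]

theorem owh_count_K_eq_ov (cycles : List (List (List Int))) (p : Int × Int) (hp : p ∈ owhPairs cycles.length) :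
    ((owhK cycles).count p : Int) = owhOv cycles p := by
  have hb := (owh_mem_pairs cycles.length p).mp hp
  rw [owh_count_K cycles p hp, owhOv]
  have hperm : ((owhIndex cycles).keys.filter
      (fun e => decide (e ∈ owhS cycles p.1) && decide (e ∈ owhS cycles p.2))).Perm
      ((owhS cycles p.1).inter (owhS cycles p.2)) := by
    refine (List.perm_ext_iff_of_nodup ((owh_index_keys_nodup cycles).filter _)
      (PySem.Set.nodup_inter _ _ (PySem.Set.nodup_ofList _))).mpr ?_
    intro e
    rw [List.mem_filter, PySem.Set.mem_inter, Bool.and_eq_true, decide_eq_true_eq, decide_eq_true_eq]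
    constructor
    · rintro ⟨-, h1, h2⟩
      exact ⟨h1, h2⟩
    · rintro ⟨h1, h2⟩
      refine ⟨(owh_mem_index_keys cycles e).mpr ⟨p.1, ?_, h1⟩, h1, h2⟩
      rw [PySem.List.mem_pyRange_one]
      omega
  rw [hperm.length_eq]

theorem owh_mem_K (cycles : List (List (List Int))) (p : Int × Int) :
    p ∈ owhK cycles ↔ p ∈ owhPairs cycles.length ∧ owhOv cycles p ≠ 0 := by
  constructor
  · intro hmem
    rw [owh_K_eq, List.mem_flatMap] at hmem
    obtain ⟨e, he, hpe⟩ := hmem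
    have hc := List.count_pos_iff.mpr hpe
    rw [owh_count_tailPairs _ (owh_ids_pairwise cycles e) p] at hc
    split at hc
    case isFalse => omega
    case isTrue h =>
      obtain ⟨h1, h2, hlt⟩ := h
      rw [owhIds, List.mem_filter, PySem.List.mem_pyRange_one, decide_eq_true_eq] at h1 h2
      have hpp : p ∈ owhPairs cycles.length := by
        rw [owh_mem_pairs]
        exact ⟨h1.1.1, hlt, h2.1.2⟩
      refine ⟨hpp, ?_⟩
      have : e ∈ (owhS cycles p.1).inter (owhS cycles p.2) :=
        (PySem.Set.mem_inter _ _ e).mpr ⟨h1.2, h2.2⟩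
      rw [owhOv]
      have hlen : 0 < ((owhS cycles p.1).inter (owhS cycles p.2)).length :=
        List.length_pos_of_mem this
      omega
  · rintro ⟨hpp, hov⟩
    have hb := (owh_mem_pairs cycles.length p).mp hpp
    rw [owhOv] at hov
    have hne : ((owhS cycles p.1).inter (owhS cycles p.2)) ≠ [] := by
      intro hnil
      rw [hnil] at hov
      exact hov rfl
    obtain ⟨e, he⟩ := List.exists_mem_of_ne_nil _ hne
    rw [PySem.Set.mem_inter] at he
    rw [owh_K_eq, List.mem_flatMap]
    refine ⟨e, (owh_mem_index_keys cycles e).mpr ⟨p.1, by rw [PySem.List.mem_pyRange_one]; omega, he.1⟩, ?_⟩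
    rw [← List.count_pos_iff, owh_count_tailPairs _ (owh_ids_pairwise cycles e) p]
    rw [if_pos ?_]
    · omega
    refine ⟨?_, ?_, hb.2.1⟩ <;>
      (rw [owhIds, List.mem_filter, PySem.List.mem_pyRange_one, decide_eq_true_eq])
    · exact ⟨⟨hb.1, by omega⟩, he.1⟩
    · exact ⟨⟨by omega, hb.2.2⟩, he.2⟩

theorem owh_setK_perm (cycles : List (List (List Int))) :
    (PySem.Set.ofList (owhK cycles)).Perm ((owhPairs cycles.length).filter (fun p => decide (owhOv cycles p ≠ 0))) := by
  refine (List.perm_ext_iff_of_nodup (PySem.Set.nodup_ofList _)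
    ((owh_pairs_nodup _).filter _)).mpr ?_
  intro p
  rw [PySem.Set.mem_ofList, List.mem_filter, decide_eq_true_eq, owh_mem_K]

theorem owh_pairs_length (m : Nat) : 2 * (owhPairs (m : Int)).length = m * (m - 1) := by
  have h : (owhPairs (m : Int)).length = ((List.range m).map (fun k => m - 1 - k)).sum := by
    rw [owhPairs, PySem.List.pyRange_zero_natCast, List.length_flatMap, List.map_map]
    refine congrArg List.sum (List.map_congr_left ?_)
    intro k _
    simp [PySem.List.length_pyRange_one]
    omega
  have h2 : ((List.range m).map (fun k => m - 1 - k)).sum = ∑ k ∈ Finset.range m, (m - 1 - k) := rfl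
  rw [h, h2, Finset.sum_range_reflect (fun k => k) m, Nat.mul_comm]
  exact Finset.sum_range_id_mul_two m

theorem owh_canon_congr (xs ys : List Int) (h : xs.Perm ys) : owhCanon xs = owhCanon ys := by
  rw [owhCanon, owhCanon]
  have hof : PySem.List.sorted (PySem.Set.ofList xs) (fun k => k) false =
      PySem.List.sorted (PySem.Set.ofList ys) (fun k => k) false := by
    apply PySem.List.sorted_eq_sorted_of_perm _ _ _ (fun a b hab => hab)
    refine (List.perm_ext_iff_of_nodup (PySem.Set.nodup_ofList _) (PySem.Set.nodup_ofList _)).mpr ?_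
    intro k
    rw [PySem.Set.mem_ofList, PySem.Set.mem_ofList]
    exact h.mem_iff
  rw [hof]
  refine List.map_congr_left (fun k _ => ?_)
  rw [h.count_eq]

theorem owh_VB_perm (cycles : List (List (List Int))) :
    (PySem.Dict.counter (owhK cycles)).values.Perm ((owhOV cycles).filter (fun v => decide (v ≠ 0))) := by
  have hval : (PySem.Dict.counter (owhK cycles)).values =
      (PySem.Set.ofList (owhK cycles)).map (fun p => ((owhK cycles).count p : Int)) := by
    simp only [PySem.Dict.values, PySem.Dict.items_counter, List.map_map]
    rfl
  rw [hval, owhOV, List.filter_map]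
  have hfil : ((owhPairs cycles.length).filter ((fun v => decide (v ≠ 0)) ∘ owhOv cycles)) =
      ((owhPairs cycles.length).filter (fun p => decide (owhOv cycles p ≠ 0))) := rfl
  rw [hfil]
  refine ((owh_setK_perm cycles).map _).trans ?_
  rw [List.map_congr_left (fun p hp => owh_count_K_eq_ov cycles p (List.mem_of_mem_filter hp))]

theorem owh_zero_eq (cycles : List (List (List Int))) (h : 2 ≤ cycles.length) :
    PySem.Int.floordiv ((cycles.length : Int) * ((cycles.length : Int) - 1)) 2
      - ((PySem.Dict.counter (owhK cycles)).size : Int) = ((owhOV cycles).count 0 : Int) := by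
  have hsize : (PySem.Dict.counter (owhK cycles)).size = (PySem.Set.ofList (owhK cycles)).length := by
    simp only [PySem.Dict.size, PySem.Dict.items_counter, List.length_map]
  have hflen : (PySem.Set.ofList (owhK cycles)).length =
      ((owhOV cycles).filter (fun v => decide (v ≠ 0))).length := by
    rw [(owh_setK_perm cycles).length_eq, owhOV, List.filter_map, List.length_map]
    rfl
  have hsplit : ((owhOV cycles).filter (fun v => decide (v ≠ 0))).length + (owhOV cycles).count 0 =
      (owhOV cycles).length := by
    have hfn : (fun x : Int => !(fun v => decide (v ≠ 0)) x) = fun x : Int => x == 0 := by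
      funext x
      by_cases hx : x = 0 <;> simp [hx]
    have h1 := (List.length_eq_length_filter_add (l := owhOV cycles) (fun v => decide (v ≠ 0))).symm
    rw [hfn] at h1
    rw [List.count_eq_length_filter]
    exact h1
  have hOVlen : (owhOV cycles).length = (owhPairs (cycles.length : Int)).length := by
    rw [owhOV, List.length_map]
  have hgauss := owh_pairs_length cycles.length
  have hfd : PySem.Int.floordiv ((cycles.length : Int) * ((cycles.length : Int) - 1)) 2 =
      ((owhPairs (cycles.length : Int)).length : Int) := by
    have hcast : ((cycles.length : Int)) * ((cycles.length : Int) - 1) =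
        ((cycles.length * (cycles.length - 1) : Nat) : Int) := by
      push_cast [Nat.cast_sub (by omega : 1 ≤ cycles.length)]
      ring
    rw [hcast, show ((2:Int)) = ((2:Nat) : Int) from rfl, PySem.Int.floordiv_natCast]
    rw [← hgauss, Nat.mul_div_cancel_left _ (by omega : 0 < 2)]
  rw [hfd, hsize, hflen]
  omega

theorem owh_B_eq_canon (cycles : List (List (List Int))) (h : ¬ ((cycles.length : Int) < 2)) :
    overlap_weight_histogram_alt cycles = owhCanon (owhOV cycles) := by
  simp only [overlap_weight_histogram_alt]
  rw [if_neg h]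
  have hpair : (PySem.List.enumerate cycles).foldl (fun d ic =>
        (PySem.Set.ofList (PySem.List.pyGetD ic.2 0 [])).foldl
          (fun d e => d.modify e [] (· ++ [ic.1])) d) PySem.Dict.empty = owhIndex cycles := rfl
  rw [hpair]
  have hK : (owhIndex cycles).values.foldl (fun p ids =>
        (PySem.List.enumerate ids).foldl (fun p ai =>
          (PySem.List.slice ids (some (ai.1 + 1)) none).foldl (fun p j =>
            p.insert (ai.2, j) (p.getD (ai.2, j) 0 + 1)) p) p) PySem.Dict.empty =
      PySem.Dict.counter (owhK cycles) := by
    rw [← PySem.Dict.foldl_insert_getD_add_one_eq_counter, owhK]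
    simp only [owhCombos, List.flatMap_def, List.foldl_flatten, List.foldl_map]
  rw [hK]
  have hhist : (PySem.Dict.counter (owhK cycles)).values.foldl
      (fun h ov => h.insert ov (h.getD ov 0 + 1)) PySem.Dict.empty =
      PySem.Dict.counter ((PySem.Dict.counter (owhK cycles)).values) :=
    PySem.Dict.foldl_insert_getD_add_one_eq_counter _
  rw [hhist, owh_zero_eq cycles (by omega)]
  have hVB := owh_VB_perm cycles
  by_cases hz : (owhOV cycles).count 0 = 0
  · rw [if_neg (by simp [hz])]
    rw [owh_sorted_counter]
    refine owh_canon_congr _ _ (hVB.trans ?_)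
    rw [List.filter_eq_self.mpr ?_]
    intro v hv
    rcases eq_or_ne v 0 with rfl | hne
    · exact absurd (List.count_eq_zero.mp hz) (fun hh => hh hv)
    · simpa using hne
  · have h0nVB : (0 : Int) ∉ (PySem.Dict.counter (owhK cycles)).values := by
      intro hmem
      have := hVB.mem_iff.mp hmem
      rw [List.mem_filter] at this
      simpa using this.2
    have hnc : (PySem.Dict.counter ((PySem.Dict.counter (owhK cycles)).values)).contains 0 = false := by
      rw [PySem.Dict.contains_counter]
      simpa using h0nVB
    rw [if_pos (by simpa using hz), PySem.Dict.items_insert_of_not_contains _ _ hnc]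
    refine PySem.List.sorted_eq_of_perm_of_pairwise_lt _ _ _ ?_ ?_
    · -- owhCanon (owhOV cycles) ~ items ++ [(0, count0)]
      rw [PySem.Dict.items_counter]
      have hcnt : ∀ k ∈ PySem.Set.ofList ((PySem.Dict.counter (owhK cycles)).values),
          ((PySem.Dict.counter (owhK cycles)).values).count k = (owhOV cycles).count k := by
        intro k hk
        rw [PySem.Set.mem_ofList] at hk
        have hk0 : k ≠ 0 := fun hh => h0nVB (hh ▸ hk)
        rw [hVB.count_eq, List.count_filter (by simpa using hk0)]
      have hmapeq : (PySem.Set.ofList ((PySem.Dict.counter (owhK cycles)).values)).map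
            (fun k => (k, (((PySem.Dict.counter (owhK cycles)).values).count k : Int)))
          = (PySem.Set.ofList ((PySem.Dict.counter (owhK cycles)).values)).map
            (fun k => (k, ((owhOV cycles).count k : Int))) :=
        List.map_congr_left (fun k hk => by rw [hcnt k hk])
      rw [hmapeq]
      have happ : (PySem.Set.ofList ((PySem.Dict.counter (owhK cycles)).values)).map
            (fun k => (k, ((owhOV cycles).count k : Int))) ++ [((0 : Int), ((owhOV cycles).count 0 : Int))]
          = ((PySem.Set.ofList ((PySem.Dict.counter (owhK cycles)).values)) ++ [(0 : Int)]).map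
            (fun k => (k, ((owhOV cycles).count k : Int))) := by
        rw [List.map_append]
        rfl
      rw [happ]
      have hofperm : (PySem.Set.ofList (owhOV cycles)).Perm
          ((PySem.Set.ofList ((PySem.Dict.counter (owhK cycles)).values)) ++ [(0 : Int)]) := by
        refine (List.perm_ext_iff_of_nodup (PySem.Set.nodup_ofList _) ?_).mpr ?_
        · rw [List.nodup_append]
          refine ⟨PySem.Set.nodup_ofList _, List.nodup_singleton _, ?_⟩
          intro x hx y hy
          have hy0 : y = 0 := by simpa using hy
          subst hy0
          intro hxy
          exact h0nVB (hxy ▸ (PySem.Set.mem_ofList _ _).mp hx)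
        · intro x
          rw [List.mem_append, PySem.Set.mem_ofList, PySem.Set.mem_ofList, List.mem_singleton]
          constructor
          · intro hx
            rcases eq_or_ne x 0 with rfl | hne
            · exact Or.inr rfl
            · refine Or.inl (hVB.mem_iff.mpr ?_)
              rw [List.mem_filter]
              exact ⟨hx, by simpa using hne⟩
          · rintro (hx | rfl)
            · exact List.mem_of_mem_filter (hVB.mem_iff.mp hx)
            · exact List.count_pos_iff.mp (by omega)
      exact ((PySem.List.sorted_perm _ _ _).trans hofperm).map _
    · rw [owhCanon, List.pairwise_map]
      exact PySem.List.sorted_ofList_pairwise_lt (owhOV cycles)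



theorem owh_main (cycles : List (List (List Int))) :
    overlap_weight_histogram cycles = overlap_weight_histogram_alt cycles := by
  rw [owh_A_eq_canon]
  by_cases hlen : (cycles.length : Int) < 2
  · have hB : overlap_weight_histogram_alt cycles = [] := by
      simp only [overlap_weight_histogram_alt]
      rw [if_pos hlen]
    rw [hB]
    have hm : cycles.length = 0 ∨ cycles.length = 1 := by
      have : cycles.length < 2 := by exact_mod_cast hlen
      omega
    have hpairs : owhPairs (cycles.length : Int) = [] := by
      rcases hm with h0 | h1
      · rw [h0]; rfl
      · rw [h1]; rfl
    rw [owhOV, hpairs, List.map_nil]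
    rfl
  · rw [owh_B_eq_canon cycles hlen]

-- ===== VERDICT (by name: the statement is the Claim_ definition above) =====
theorem overlap_weight_histogram_spec : Claim_equal_overlap_weight_histogram := by
  intro cycles _ _
  unfold Spec_overlap_weight_histogram
  exact owh_main cycles
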